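-- pv_equiv track=rewrite | github.com/PracticeofEno/programmers_coding_test_practice | python/best_group.py | solution
-- ===== SOURCE A (Python) =====
-- def solution(n, s):
--     if (s < n):
--         return [-1]
--     mok = s // n
--     mod = s % n
--
--     answer = []
--     for i in range(n):
--         if mod > 0:
--             answer.append(mok + 1)
--             mod -= 1
--         else:
--             answer.append(mok)
--     answer.sort()
--     return answer
-- ===== SOURCE B (Python) =====
-- def solution(n, s):
--     if s < n:
--         return [-1]
--     # each slot computed independently: slot i gets (s + i) // n,
--     # which is already nondecreasing in i, so no sort is needed
--     return [(s + i) // n for i in range(n)]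
-- ===== Notes on version B (the rewrite author's own statement) =====
-- stated objective: simpler
-- what changed: B computes each slot independently by the direct per-index formula (s+i)//n, which is already sorted, replacing A's decrementing-remainder append loop followed by a sort.
import Mathlib
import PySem

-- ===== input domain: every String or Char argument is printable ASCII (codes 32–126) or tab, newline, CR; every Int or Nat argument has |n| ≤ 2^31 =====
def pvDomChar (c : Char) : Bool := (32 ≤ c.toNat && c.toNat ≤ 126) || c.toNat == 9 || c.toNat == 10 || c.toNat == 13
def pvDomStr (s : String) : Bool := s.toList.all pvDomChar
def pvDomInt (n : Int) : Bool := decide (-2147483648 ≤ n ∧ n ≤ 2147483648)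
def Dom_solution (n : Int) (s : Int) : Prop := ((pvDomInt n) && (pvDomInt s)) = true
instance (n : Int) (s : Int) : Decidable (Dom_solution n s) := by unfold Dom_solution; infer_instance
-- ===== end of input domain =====

-- B computes slot i directly as (s+i)//n — already sorted — instead of A's remainder-counting append loop plus sort (simpler: one formula, no sort).

-- ===== PORT A =====
def solution (n : Int) (s : Int) : List Int :=
  if s < n then [-1]
  else
    let mok := PySem.Int.floordiv s n
    let st := (PySem.List.pyRange 0 n 1).foldl
      (fun (p : List Int × Int) _ =>
        if p.2 > 0 then (p.1 ++ [mok + 1], p.2 - 1) else (p.1 ++ [mok], p.2))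
      ([], PySem.Int.mod s n)
    PySem.List.sorted st.1 (fun x => x) false

-- ===== PORT B =====
def solution_alt (n : Int) (s : Int) : List Int :=
  if s < n then [-1]
  else (PySem.List.pyRange 0 n 1).map (fun i => PySem.Int.floordiv (s + i) n)

-- ===== PRECONDITION & SPEC =====
-- Pre_ excludes exactly n = 0 with 0 ≤ s, where A raises ZeroDivisionError (s // n).
def Pre_solution (n : Int) (s : Int) : Prop := ¬ (n = 0 ∧ 0 ≤ s)
instance (n : Int) (s : Int) : Decidable (Pre_solution n s) := by unfold Pre_solution; infer_instance
def pvWitness_solution : Int × Int := (3, 7)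

def Spec_solution (n : Int) (s : Int) (out : List Int) : Prop := out = solution_alt n s
instance (n : Int) (s : Int) (out : List Int) : Decidable (Spec_solution n s out) := by unfold Spec_solution; infer_instance

-- ===== CLAIM (what is proved, stated in full; the proofs are below) =====
def Claim_equal_solution : Prop := ∀ (n : Int) (s : Int), Dom_solution n s → Pre_solution n s → Spec_solution n s (solution n s)

-- ===== LEMMAS AND PROOFS =====

-- A's loop: with 0 ≤ m, the first m iterations append mok+1 and the rest append mok.
lemma loop_char (mok : Int) (l : List Int) (acc : List Int) (m : Int) (hm : 0 ≤ m) :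
    (l.foldl
      (fun (p : List Int × Int) _ =>
        if p.2 > 0 then (p.1 ++ [mok + 1], p.2 - 1) else (p.1 ++ [mok], p.2))
      (acc, m)).1
    = acc ++ List.replicate (min l.length m.toNat) (mok + 1)
          ++ List.replicate (l.length - m.toNat) mok := by
  induction l generalizing acc m with
  | nil => simp
  | cons x t ih =>
    by_cases hpos : m > 0
    · simp only [List.foldl_cons, if_pos hpos]
      rw [ih (acc ++ [mok + 1]) (m - 1) (by omega)]
      have h1 : min (x :: t).length m.toNat = min t.length (m - 1).toNat + 1 := by
        simp [List.length_cons]; omega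
      have h2 : (x :: t).length - m.toNat = t.length - (m - 1).toNat := by
        simp [List.length_cons]; omega
      rw [h1, h2, List.replicate_succ]
      simp
    · simp only [List.foldl_cons, if_neg hpos]
      have hm0 : m = 0 := by omega
      subst hm0
      rw [ih (acc ++ [mok]) 0 le_rfl]
      simp [List.replicate_succ]

-- B's map over a range where f is constant collapses to a replicate block.
lemma map_range_const (a b : Int) (f : Int → Int) (c : Int)
    (h : ∀ i, a ≤ i → i < b → f i = c) :
    (PySem.List.pyRange a b 1).map f = List.replicate (b - a).toNat c := by
  refine List.eq_replicate_iff.mpr ⟨by simp [PySem.List.length_pyRange_one], ?_⟩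
  intro x hx
  obtain ⟨i, hi, rfl⟩ := List.mem_map.mp hx
  obtain ⟨h1, h2⟩ := (PySem.List.mem_pyRange_one).mp hi
  exact h i h1 h2

theorem solution_spec : Claim_equal_solution := by
  intro n s _ hpre
  unfold Spec_solution solution solution_alt
  by_cases hlt : s < n
  · simp [hlt]
  · simp only [if_neg hlt]
    by_cases hn : 0 < n
    · have hm0 : 0 ≤ PySem.Int.mod s n := PySem.Int.mod_nonneg s hn
      have hmlt : PySem.Int.mod s n < n := PySem.Int.mod_lt s hn
      have hs : PySem.Int.floordiv s n * n + PySem.Int.mod s n = s :=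
        PySem.Int.floordiv_mul_add_mod s n
      set mok := PySem.Int.floordiv s n with hmok
      set m := PySem.Int.mod s n with hm
      -- A's side: loop result sorted = blocks
      rw [loop_char mok (PySem.List.pyRange 0 n 1) [] m hm0]
      have hlen : (PySem.List.pyRange 0 n 1).length = (n - 0).toNat :=
        PySem.List.length_pyRange_one 0 n
      have hmin : min (PySem.List.pyRange 0 n 1).length m.toNat = m.toNat := by
        rw [hlen]; omega
      have hsub : (PySem.List.pyRange 0 n 1).length - m.toNat = (n - m).toNat := by
        rw [hlen]; omega
      rw [hmin, hsub, List.nil_append]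
      have hA : PySem.List.sorted
          (List.replicate m.toNat (mok + 1) ++ List.replicate (n - m).toNat mok)
          (fun x => x) false
          = List.replicate (n - m).toNat mok ++ List.replicate m.toNat (mok + 1) := by
        exact PySem.List.sorted_id_eq_of_perm_of_pairwise _ _
          (List.perm_append_comm)
          (by
            rw [List.pairwise_append]
            refine ⟨List.pairwise_replicate.mpr (by omega),
                    List.pairwise_replicate.mpr (by omega), ?_⟩
            intro a ha b hb
            rw [List.eq_of_mem_replicate ha, List.eq_of_mem_replicate hb]
            omega)
      rw [hA]
      -- B's side: split the range at n - m; each half maps to a constant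
      rw [PySem.List.pyRange_one_append 0 (n - m) n (by omega) (by omega),
          List.map_append]
      rw [map_range_const 0 (n - m) _ mok (by
        intro i h1 h2
        rw [PySem.Int.floordiv_eq_iff_of_pos hn]
        constructor <;> nlinarith [hs])]
      rw [map_range_const (n - m) n _ (mok + 1) (by
        intro i h1 h2
        rw [PySem.Int.floordiv_eq_iff_of_pos hn]
        constructor <;> nlinarith [hs])]
      have e1 : (n - m - 0).toNat = (n - m).toNat := by omega
      have e2 : (n - (n - m)).toNat = m.toNat := by omega
      rw [e1, e2]
    · -- n ≤ 0 (n ≠ 0 here: n = 0 with ¬ s < n forces 0 ≤ s, excluded by Pre_)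
      have hneg : n < 0 := by
        by_cases h0 : n = 0
        · exact absurd ⟨h0, by omega⟩ hpre
        · omega
      have hrange : PySem.List.pyRange 0 n 1 = [] :=
        PySem.List.pyRange_one_eq_nil (by omega)
      rw [hrange]
      simp [PySem.List.sorted]
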